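-- pv_equiv track=rewrite | github.com/prominence-eosc/prominence | htcondor/hooks/workflow_handler.py | get_num_cpus
-- ===== SOURCE A (Python) =====
-- def get_num_cpus(job_cpus, num_idle_jobs):
--     cpus_select = job_cpus
--     scaling = 1
--
--     if job_cpus <= 4:
--         cpus_select = -1
--         for i in range(0, 17):
--             if i*job_cpus <= 16 and i <= num_idle_jobs:
--                 if i*job_cpus > cpus_select:
--                     cpus_select = i*job_cpus
--                     scaling = i
--
--     return (scaling, cpus_select)
-- ===== SOURCE B (Python) =====
-- def get_num_cpus(job_cpus, num_idle_jobs):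
--     if job_cpus > 4:
--         return (1, job_cpus)
--     scaling = max(0, min(16 // job_cpus, num_idle_jobs))
--     return (scaling, scaling * job_cpus)
-- ===== Notes on version B (the rewrite author's own statement) =====
-- stated objective: simpler
-- what changed: Replaces A's fixed 17-iteration argmax scan with closed-form arithmetic scaling = max(0, min(16 // job_cpus, num_idle_jobs)); Pre_ excludes job_cpus = 0, where B's division raises ZeroDivisionError while A returns a value.
-- intended difference: For job_cpus <= 4 (and nonzero) with num_idle_jobs < 0, A returns the sentinel (1, -1) left over from its never-updated loop accumulator (scaling 1 with -1 cpus is not a meaningful allocation); B returns (0, 0), the intended 'no idle jobs, nothing to pack' answer. — e.g. on get_num_cpus(2, -1): A returns (1, -1), B returns (0, 0)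
-- outside the precondition, e.g. on get_num_cpus(0, 3): A returns (0, 0), B raises ZeroDivisionError
import Mathlib
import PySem

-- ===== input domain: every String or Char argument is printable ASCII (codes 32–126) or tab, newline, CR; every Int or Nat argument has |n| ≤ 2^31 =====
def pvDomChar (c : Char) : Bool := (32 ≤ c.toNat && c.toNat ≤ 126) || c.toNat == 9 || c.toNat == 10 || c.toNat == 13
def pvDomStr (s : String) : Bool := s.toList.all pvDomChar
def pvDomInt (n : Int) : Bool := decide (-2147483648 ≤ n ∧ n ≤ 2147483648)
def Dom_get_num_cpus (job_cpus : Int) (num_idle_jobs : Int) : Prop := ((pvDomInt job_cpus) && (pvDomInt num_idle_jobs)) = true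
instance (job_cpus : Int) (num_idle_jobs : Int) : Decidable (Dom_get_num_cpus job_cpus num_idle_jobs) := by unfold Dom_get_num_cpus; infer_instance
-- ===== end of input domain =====

-- B replaces A's fixed 17-step argmax scan with closed-form arithmetic (objective: simpler).

-- ===== PORT A =====
-- loop body of A's `for i in range(0, 17)` over state (scaling, cpus_select)
def pvStepA (job_cpus : Int) (num_idle_jobs : Int) (st : Int × Int) (i : Int) : Int × Int :=
  if i * job_cpus ≤ 16 ∧ i ≤ num_idle_jobs then
    (if i * job_cpus > st.2 then (i, i * job_cpus) else st)
  else st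

def get_num_cpus (job_cpus : Int) (num_idle_jobs : Int) : Int × Int :=
  -- cpus_select = job_cpus; scaling = 1
  if job_cpus ≤ 4 then
    (PySem.List.pyRange 0 17 1).foldl (pvStepA job_cpus num_idle_jobs) (1, -1)
  else
    (1, job_cpus)

-- ===== PORT B =====
def get_num_cpus_alt (job_cpus : Int) (num_idle_jobs : Int) : Int × Int :=
  if job_cpus > 4 then (1, job_cpus)
  else
    let scaling := max 0 (min (PySem.Int.floordiv 16 job_cpus) num_idle_jobs)
    (scaling, scaling * job_cpus)

-- ===== PRECONDITION & SPEC =====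
-- Pre_ excludes job_cpus = 0, where B's `16 // job_cpus` raises ZeroDivisionError while A returns a value.
def Pre_get_num_cpus (job_cpus : Int) (num_idle_jobs : Int) : Prop := job_cpus ≠ 0
instance (job_cpus : Int) (num_idle_jobs : Int) : Decidable (Pre_get_num_cpus job_cpus num_idle_jobs) := by unfold Pre_get_num_cpus; infer_instance
def pvWitness_get_num_cpus : Int × Int := (2, 3)

-- For job_cpus ≤ 4 (nonzero) with num_idle_jobs < 0, A returns the sentinel (1, -1) left over from its
-- never-updated loop accumulator; B returns (0, 0), the intended 'no idle jobs, nothing to pack' answer.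
def D_get_num_cpus (job_cpus : Int) (num_idle_jobs : Int) : Prop :=
  job_cpus ≤ 4 ∧ job_cpus ≠ 0 ∧ num_idle_jobs < 0
instance (job_cpus : Int) (num_idle_jobs : Int) : Decidable (D_get_num_cpus job_cpus num_idle_jobs) := by unfold D_get_num_cpus; infer_instance

def Spec_get_num_cpus (job_cpus : Int) (num_idle_jobs : Int) (out : Int × Int) : Prop := ¬ D_get_num_cpus job_cpus num_idle_jobs → out = get_num_cpus_alt job_cpus num_idle_jobs
instance (job_cpus : Int) (num_idle_jobs : Int) (out : Int × Int) : Decidable (Spec_get_num_cpus job_cpus num_idle_jobs out) := by unfold Spec_get_num_cpus; infer_instance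

def pvDiffWitness_get_num_cpus : Int × Int := (2, -1)
def pvDiffWitnessOut_get_num_cpus : (Int × Int) × (Int × Int) := ((1, -1), (0, 0))

-- ===== CLAIM =====
def Claim_unchanged_get_num_cpus : Prop := ∀ (job_cpus : Int) (num_idle_jobs : Int), Dom_get_num_cpus job_cpus num_idle_jobs → Pre_get_num_cpus job_cpus num_idle_jobs → Spec_get_num_cpus job_cpus num_idle_jobs (get_num_cpus job_cpus num_idle_jobs)
def Claim_changed_get_num_cpus : Prop := Dom_get_num_cpus (pvDiffWitness_get_num_cpus.1) (pvDiffWitness_get_num_cpus.2) ∧ Pre_get_num_cpus (pvDiffWitness_get_num_cpus.1) (pvDiffWitness_get_num_cpus.2) ∧ D_get_num_cpus (pvDiffWitness_get_num_cpus.1) (pvDiffWitness_get_num_cpus.2) ∧ get_num_cpus (pvDiffWitness_get_num_cpus.1) (pvDiffWitness_get_num_cpus.2) = pvDiffWitnessOut_get_num_cpus.1 ∧ get_num_cpus_alt (pvDiffWitness_get_num_cpus.1) (pvDiffWitness_get_num_cpus.2) = pvDiffWitnessOut_get_num_cpus.2 ∧ pvDiffWitnessOut_get_num_cpus.1 ≠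 pvDiffWitnessOut_get_num_cpus.2
def Claim_exact_get_num_cpus : Prop := ∀ (job_cpus : Int) (num_idle_jobs : Int), Dom_get_num_cpus job_cpus num_idle_jobs → Pre_get_num_cpus job_cpus num_idle_jobs → D_get_num_cpus job_cpus num_idle_jobs → get_num_cpus job_cpus num_idle_jobs ≠ get_num_cpus_alt job_cpus num_idle_jobs

-- ===== LEMMAS AND PROOFS =====

lemma pvRange17 : PySem.List.pyRange 0 17 1 =
    [0,1,2,3,4,5,6,7,8,9,10,11,12,13,14,15,16] := by decide

lemma pvFoldlFixed {α β : Type} (f : β → α → β) (b : β) (l : List α)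
    (h : ∀ a ∈ l, f b a = b) : l.foldl f b = b := by
  induction l with
  | nil => rfl
  | cons a l ih =>
    simp only [List.foldl_cons, h a (List.mem_cons_self)]
    exact ih (fun a' ha' => h a' (List.mem_cons_of_mem a ha'))

-- num_idle_jobs < 0: no iteration fires, state stays (1, -1)
lemma pvLoopNeg (c n : Int) (hn : n < 0) :
    (PySem.List.pyRange 0 17 1).foldl (pvStepA c n) (1, -1) = (1, -1) := by
  refine pvFoldlFixed _ _ _ (fun i hi => ?_)
  rw [pvRange17] at hi
  have hi0 : 0 ≤ i := by fin_cases hi <;> norm_num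
  simp only [pvStepA]
  rw [if_neg]
  rintro ⟨-, h2⟩; omega

-- num_idle_jobs ≥ 0, job_cpus ≤ 0: i = 0 sets (0, 0), no later step improves
lemma pvLoopNonpos (c n : Int) (hc : c ≤ 0) (hn : 0 ≤ n) :
    (PySem.List.pyRange 0 17 1).foldl (pvStepA c n) (1, -1) = (0, 0) := by
  rw [pvRange17]
  rw [show ([0,1,2,3,4,5,6,7,8,9,10,11,12,13,14,15,16] : List Int) =
      0 :: [1,2,3,4,5,6,7,8,9,10,11,12,13,14,15,16] from rfl, List.foldl_cons]
  rw [show pvStepA c n (1, -1) 0 = (0, 0) by simp [pvStepA, hn]]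
  refine pvFoldlFixed _ _ _ (fun i hi => ?_)
  have hi1 : 1 ≤ i := by fin_cases hi <;> norm_num
  simp only [pvStepA]
  have : ¬ i * c > (0 : Int) := by nlinarith
  split_ifs <;> simp_all

-- negative divisor: 16 // c ≤ 0
lemma pvFdNonpos (c : Int) (hc : c ≤ -1) : PySem.Int.floordiv 16 c ≤ 0 := by
  by_contra h
  have hq : 1 ≤ PySem.Int.floordiv 16 c := by omega
  have hm := PySem.Int.floordiv_mul_add_mod 16 c
  have hb := PySem.Int.mod_neg_bounds (a := 16) (b := c) (by omega)
  nlinarith [hb.1, hb.2]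

theorem get_num_cpus_spec_aux (c n : Int) (hc0 : c ≠ 0) (hnd : ¬ (c ≤ 4 ∧ c ≠ 0 ∧ n < 0)) :
    get_num_cpus c n = get_num_cpus_alt c n := by
  unfold get_num_cpus get_num_cpus_alt
  by_cases hc4 : c ≤ 4
  · have hn : 0 ≤ n := by omega
    rw [if_pos hc4, if_neg (by omega)]
    by_cases hcneg : c ≤ -1
    · rw [pvLoopNonpos c n (by omega) hn]
      have hfd := pvFdNonpos c hcneg
      have : max 0 (min (PySem.Int.floordiv 16 c) n) = 0 := by omega
      simp [this]
    · have hc1 : 1 ≤ c := by omega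
      have hc4' : c ≤ 4 := hc4
      have hfd : 4 ≤ PySem.Int.floordiv 16 c := by
        interval_cases c <;> decide
      have hmax : max 0 (min (PySem.Int.floordiv 16 c) n) = min (PySem.Int.floordiv 16 c) n := by
        omega
      rw [hmax]
      by_cases hbig : 16 ≤ n
      · -- every i in the range satisfies i ≤ n: drop that conjunct, then compute
        rw [pvRange17]
        rw [PySem.List.foldl_congr_mem _ _
          (fun (st : Int × Int) i => if i * c ≤ 16 then (if i * c > st.2 then (i, i * c) else st) else st) _
          (by
            intro st i hi
            have : i ≤ n := by fin_cases hi <;> omega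
            simp [pvStepA, this])]
        have hmin : min (PySem.Int.floordiv 16 c) n = PySem.Int.floordiv 16 c := by
          interval_cases c <;> simp_all [PySem.Int.floordiv] <;> omega
        rw [hmin]
        interval_cases c <;> decide
      · -- 0 ≤ n < 16: finitely many literal cases
        interval_cases c <;> interval_cases n <;> decide
  · rw [if_neg hc4, if_pos (by omega)]

-- ===== VERDICT =====
theorem get_num_cpus_spec : Claim_unchanged_get_num_cpus := by
  intro c n _ hpre hnd
  exact get_num_cpus_spec_aux c n hpre hnd

theorem get_num_cpus_changed : Claim_changed_get_num_cpus := by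
  unfold Claim_changed_get_num_cpus; decide

theorem get_num_cpus_tight : Claim_exact_get_num_cpus := by
  intro c n _ _ hd
  obtain ⟨hc4, hc0, hn⟩ := hd
  unfold get_num_cpus get_num_cpus_alt
  rw [if_pos hc4, if_neg (by omega), pvLoopNeg c n hn]
  have : min (PySem.Int.floordiv 16 c) n ≤ n := min_le_right _ _
  have hmax : max 0 (min (PySem.Int.floordiv 16 c) n) = 0 := by omega
  simp [hmax]
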